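-- pv_equiv track=rewrite | github.com/KalvaNaveen/AutonomousTradingEngine | agents/vcp_agent.py | _find_structural_swings
-- ===== SOURCE A (Python) =====
-- SWING_LOOKBACK        = 5      # bars each side for structural swing detection
--
-- def _find_structural_swings(closes: list, base_start: int) -> tuple:
--     n = len(closes)
--     sw = SWING_LOOKBACK
--     highs, lows = [], []
--
--     for i in range(max(sw, base_start), n - sw):
--         window = closes[i - sw: i + sw + 1]
--         mid = closes[i]
--         if mid == max(window):
--             highs.append((i, mid))
--         if mid == min(window):
--             lows.append((i, mid))
--     return highs, lows
-- ===== SOURCE B (Python) =====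
-- # B: sliding-window extrema via two monotonic deques maintained in one pass, instead
-- # of recomputing max/min over a fresh 11-element slice at every index.
-- from collections import deque
--
-- SWING_LOOKBACK = 5
--
--
-- def _find_structural_swings(closes: list, base_start: int) -> tuple:
--     n = len(closes)
--     sw = SWING_LOOKBACK
--     highs, lows = [], []
--     start = max(sw, base_start)
--     if start > n - sw - 1:
--         return highs, lows
--
--     maxd, mind = deque(), deque()  # indices; values decreasing / increasing
--     for j in range(start - sw, start + sw):  # prefill window minus its right edge
--         while maxd and closes[maxd[-1]] <= closes[j]:
--             maxd.pop()
--         maxd.append(j)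
--         while mind and closes[mind[-1]] >= closes[j]:
--             mind.pop()
--         mind.append(j)
--
--     for i in range(start, n - sw):
--         j = i + sw  # new right edge of window [i-sw, i+sw]
--         while maxd and closes[maxd[-1]] <= closes[j]:
--             maxd.pop()
--         maxd.append(j)
--         while mind and closes[mind[-1]] >= closes[j]:
--             mind.pop()
--         mind.append(j)
--         if maxd[0] < i - sw:  # at most one index expires per step
--             maxd.popleft()
--         if mind[0] < i - sw:
--             mind.popleft()
--         c = closes[i]
--         if c == closes[maxd[0]]:
--             highs.append((i, c))
--         if c == closes[mind[0]]:
--             lows.append((i, c))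
--     return highs, lows
-- ===== Notes on version B (the rewrite author's own statement) =====
-- stated objective: faster
-- what changed: Instead of recomputing max()/min() over a fresh 11-element slice at every index, B maintains two monotonic deques of indices (decreasing for window maxima, increasing for window minima) in a single pass, giving amortized O(1) window extrema per index.
import Mathlib
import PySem

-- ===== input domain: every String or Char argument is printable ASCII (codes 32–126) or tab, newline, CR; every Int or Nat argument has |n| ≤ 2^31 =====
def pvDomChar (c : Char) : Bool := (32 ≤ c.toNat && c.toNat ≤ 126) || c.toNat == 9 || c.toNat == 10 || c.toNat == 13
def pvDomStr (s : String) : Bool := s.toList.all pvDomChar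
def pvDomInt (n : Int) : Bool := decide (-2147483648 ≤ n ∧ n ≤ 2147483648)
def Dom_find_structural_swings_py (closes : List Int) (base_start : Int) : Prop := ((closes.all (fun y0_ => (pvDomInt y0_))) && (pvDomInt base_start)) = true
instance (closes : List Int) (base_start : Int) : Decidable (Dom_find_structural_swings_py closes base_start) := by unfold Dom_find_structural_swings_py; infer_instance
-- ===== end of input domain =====

-- B replaces the per-index max()/min() over a fresh 11-element window slice by two
-- monotonic index deques maintained in one pass (a different, deque-based algorithm).

-- ===== PORT A =====
-- closes[j] for an index the loop guarantees in range (0 ≤ j < len closes): the default is never used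
def pvGv (cs : List Int) (j : Int) : Int := PySem.List.pyGetD cs j 0

def find_structural_swings_py (closes : List Int) (base_start : Int) : (List (Int × Int)) × (List (Int × Int)) :=
  let n : Int := closes.length
  let sw : Int := 5
  -- for i in range(max(sw, base_start), n - sw): window slice, compare mid with max/min
  (PySem.List.pyRange (max sw base_start) (n - sw) 1).foldl
    (fun st i =>
      let window := PySem.List.slice closes (some (i - sw)) (some (i + sw + 1))
      let mid := pvGv closes i
      -- max(window)/min(window): window is nonempty inside the loop, so max?/min? are some
      let st1 := if PySem.List.max? window (fun y => y) = some mid then (st.1 ++ [(i, mid)], st.2) else st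
      if PySem.List.min? window (fun y => y) = some mid then (st1.1, st1.2 ++ [(i, mid)]) else st1)
    ([], [])

-- ===== PORT B =====
-- while maxd and closes[maxd[-1]] <= closes[j]: maxd.pop();  maxd.append(j)
def pvPushMax (cs : List Int) (D : List Int) (j : Int) : List Int :=
  (D.reverse.dropWhile (fun d => decide (pvGv cs d ≤ pvGv cs j))).reverse ++ [j]

-- while mind and closes[mind[-1]] >= closes[j]: mind.pop();  mind.append(j)
def pvPushMin (cs : List Int) (D : List Int) (j : Int) : List Int :=
  (D.reverse.dropWhile (fun d => decide (pvGv cs d ≥ pvGv cs j))).reverse ++ [j]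

-- if D[0] < lo: D.popleft()   (D is nonempty at every call site)
def pvTrim (D : List Int) (lo : Int) : List Int :=
  match D with
  | [] => []
  | d :: ds => if d < lo then ds else d :: ds

def find_structural_swings_py_alt (closes : List Int) (base_start : Int) : (List (Int × Int)) × (List (Int × Int)) :=
  let n : Int := closes.length
  let sw : Int := 5
  let start := max sw base_start
  if n - sw - 1 < start then ([], [])
  else
    -- prefill the deques with the first window minus its right edge
    let pre := (PySem.List.pyRange (start - sw) (start + sw) 1).foldl
      (fun (p : List Int × List Int) j => (pvPushMax closes p.1 j, pvPushMin closes p.2 j))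
      ([], [])
    let res := (PySem.List.pyRange start (n - sw) 1).foldl
      (fun (st : (List Int × List Int) × (List (Int × Int) × List (Int × Int))) i =>
        let maxd := pvTrim (pvPushMax closes st.1.1 (i + sw)) (i - sw)
        let mind := pvTrim (pvPushMin closes st.1.2 (i + sw)) (i - sw)
        let c := pvGv closes i
        let hs := if c = pvGv closes (maxd.headD 0) then st.2.1 ++ [(i, c)] else st.2.1
        let ls := if c = pvGv closes (mind.headD 0) then st.2.2 ++ [(i, c)] else st.2.2
        ((maxd, mind), (hs, ls)))
      ((pre.1, pre.2), ([], []))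
    res.2

-- ===== PRECONDITION & SPEC =====
def Spec_find_structural_swings_py (closes : List Int) (base_start : Int) (out : (List (Int × Int)) × (List (Int × Int))) : Prop := out = find_structural_swings_py_alt closes base_start
instance (closes : List Int) (base_start : Int) (out : (List (Int × Int)) × (List (Int × Int))) : Decidable (Spec_find_structural_swings_py closes base_start out) := by unfold Spec_find_structural_swings_py; infer_instance

-- ===== CLAIM (what is proved, stated in full; the proofs are below) =====
def Claim_equal_find_structural_swings_py : Prop := ∀ (closes : List Int) (base_start : Int), Dom_find_structural_swings_py closes base_start → Spec_find_structural_swings_py closes base_start (find_structural_swings_py closes base_start)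

-- ===== LEMMAS AND PROOFS =====

-- the canonical content of a monotonic deque over window [L, r] with value function f:
-- indices j ∈ [L, r] whose value strictly dominates every later value in the window
def pvCand (f : Int → Int) (L r : Int) : List Int :=
  (PySem.List.pyRange L (r + 1) 1).filter
    (fun j => (PySem.List.pyRange (j + 1) (r + 1) 1).all (fun k => decide (f k < f j)))

theorem mem_pvCand {f : Int → Int} {L r j : Int} :
    j ∈ pvCand f L r ↔ (L ≤ j ∧ j ≤ r ∧ ∀ k, j < k → k ≤ r → f k < f j) := by
  simp only [pvCand, List.mem_filter, PySem.List.mem_pyRange_one, List.all_eq_true,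
    decide_eq_true_eq]
  constructor
  · rintro ⟨⟨h1, h2⟩, h3⟩
    exact ⟨h1, by omega, fun k hk1 hk2 => h3 k ⟨by omega, by omega⟩⟩
  · rintro ⟨h1, h2, h3⟩
    exact ⟨⟨h1, by omega⟩, fun k hk => h3 k (by omega) (by omega)⟩

theorem pvCand_sorted (f : Int → Int) (L r : Int) : (pvCand f L r).Pairwise (· < ·) :=
  (PySem.List.pairwise_lt_pyRange_one L (r + 1)).filter _

theorem pvCand_val_sorted (f : Int → Int) (L r : Int) :
    (pvCand f L r).Pairwise (fun a b => f b < f a) := by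
  refine (pvCand_sorted f L r).imp_of_mem (fun {a b} ha hb hab => ?_)
  exact (mem_pvCand.mp ha).2.2 b hab (mem_pvCand.mp hb).2.1

-- splitting off the left end
theorem pvCand_cons_split (f : Int → Int) {L r : Int} (h : L ≤ r) :
    pvCand f L r =
      (if (PySem.List.pyRange (L + 1) (r + 1) 1).all (fun k => decide (f k < f L)) then [L] else [])
        ++ pvCand f (L + 1) r := by
  rw [pvCand, pvCand, PySem.List.pyRange_one_cons (by omega : L < r + 1), List.filter_cons]
  split <;> simp

-- a monotone dropWhile on an increasing list is a filter
theorem dropWhile_eq_filter_of_pairwise {f : Int → Int} {v : Int} :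
    ∀ {l : List Int}, l.Pairwise (fun a b => f a < f b) →
      l.dropWhile (fun d => decide (f d ≤ v)) = l.filter (fun d => decide (v < f d)) := by
  intro l hl
  induction l with
  | nil => rfl
  | cons x t ih =>
    rcases List.pairwise_cons.mp hl with ⟨hx, ht⟩
    by_cases hfx : f x ≤ v
    · rw [List.dropWhile_cons, List.filter_cons]
      simp only [hfx, decide_true, if_true, not_lt.mpr hfx, decide_false]
      simp only [Bool.false_eq_true, if_false]
      exact ih ht
    · rw [not_le] at hfx
      rw [List.dropWhile_cons, List.filter_cons]
      simp only [not_le.mpr hfx, decide_false, Bool.false_eq_true, if_false, hfx, decide_true,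
        if_true]
      rw [List.filter_eq_self.mpr]
      intro b hb
      exact decide_eq_true_eq.mpr (lt_trans hfx (hx b hb))

-- the push step: popping dominated candidates off the back then appending r+1
theorem pvCand_push (f : Int → Int) {L r : Int} (h : L ≤ r + 1) :
    ((pvCand f L r).reverse.dropWhile (fun d => decide (f d ≤ f (r + 1)))).reverse ++ [r + 1]
      = pvCand f L (r + 1) := by
  have hrev : (pvCand f L r).reverse.Pairwise (fun a b => f a < f b) := by
    rw [List.pairwise_reverse]; exact pvCand_val_sorted f L r
  rw [dropWhile_eq_filter_of_pairwise hrev, List.filter_reverse, List.reverse_reverse]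
  have hb : L ≤ r + 1 := h
  conv_rhs => rw [pvCand, PySem.List.pyRange_one_succ_right hb, List.filter_append]
  have hlast : (List.filter
      (fun j => (PySem.List.pyRange (j + 1) (r + 1 + 1) 1).all fun k => decide (f k < f j))
      [r + 1]) = [r + 1] := by
    simp [PySem.List.pyRange_one_eq_nil (by omega : r + 1 + 1 ≤ r + 1 + 1)]
  rw [hlast]
  congr 1
  rw [pvCand, List.filter_filter]
  refine List.filter_congr (fun j hj => ?_)
  rw [PySem.List.mem_pyRange_one] at hj
  rw [PySem.List.pyRange_one_succ_right (by omega : j + 1 ≤ r + 1), List.all_append]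
  simp [Bool.and_comm]


theorem pvTrim_noop {D : List Int} {lo : Int} (h : ∀ d ∈ D, lo ≤ d) : pvTrim D lo = D := by
  cases D with
  | nil => rfl
  | cons d ds =>
    have : ¬ d < lo := not_lt.mpr (h d List.mem_cons_self)
    simp [pvTrim, this]

theorem pvTrim_cand (f : Int → Int) {L r : Int} (h : L ≤ r) :
    pvTrim (pvCand f L r) (L + 1) = pvCand f (L + 1) r := by
  rw [pvCand_cons_split f h]
  split
  · simp [pvTrim]
  · rw [List.nil_append]
    exact pvTrim_noop (fun d hd => (mem_pvCand.mp hd).1)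

-- the head of the deque carries the window maximum of f
theorem pvCand_head (f : Int → Int) {L r : Int} (h : L ≤ r) :
    ∃ hd, (pvCand f L r).head? = some hd ∧ L ≤ hd ∧ hd ≤ r ∧
      ∀ j, L ≤ j → j ≤ r → f j ≤ f hd := by
  have hr : r ∈ pvCand f L r :=
    mem_pvCand.mpr ⟨h, le_refl r, fun k hk1 hk2 => absurd hk1 (by omega)⟩
  obtain ⟨hd, tl, hC⟩ : ∃ hd tl, pvCand f L r = hd :: tl := by
    cases hE : pvCand f L r with
    | nil => rw [hE] at hr; exact absurd hr List.not_mem_nil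
    | cons x y => exact ⟨x, y, rfl⟩
  · have hhd : hd ∈ pvCand f L r := hC ▸ List.mem_cons_self
    obtain ⟨hl, hrr, hprop⟩ := mem_pvCand.mp hhd
    refine ⟨hd, by rw [hC]; rfl, hl, hrr, ?_⟩
    have hmin : ∀ x ∈ pvCand f L r, hd ≤ x := by
      intro x hx
      rw [hC] at hx
      rcases List.mem_cons.mp hx with h1 | h1
      · omega
      · exact le_of_lt ((List.pairwise_cons.mp (hC ▸ pvCand_sorted f L r)).1 x h1)
    have incand : ∀ j, j ∈ pvCand f L r → f j ≤ f hd := by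
      intro j hj
      rcases eq_or_lt_of_le (hmin j hj) with h1 | h1
      · rw [← h1]
      · exact le_of_lt (hprop j h1 (mem_pvCand.mp hj).2.1)
    have aux : ∀ (m : Nat) (j : Int), L ≤ j → j ≤ r → (r - j).toNat ≤ m → f j ≤ f hd := by
      intro m
      induction m with
      | zero =>
        intro j h1 h2 h3
        have hjr : j = r := by omega
        exact hjr ▸ incand r hr
      | succ m ih =>
        intro j h1 h2 h3
        by_cases hj : j ∈ pvCand f L r
        · exact incand j hj
        · have hnot2 : ∃ k, j < k ∧ k ≤ r ∧ f j ≤ f k := by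
            by_contra hno
            refine hj (mem_pvCand.mpr ⟨h1, h2, fun k hk1 hk2 => ?_⟩)
            by_contra hlt
            exact hno ⟨k, hk1, hk2, not_lt.mp hlt⟩
          obtain ⟨k, hk1, hk2, hk3⟩ := hnot2
          exact le_trans hk3 (ih k (by omega) hk2 (by omega))
    exact fun j h1 h2 => aux (r - j).toNat j h1 h2 (le_refl _)

-- the A-side window slice is the window's value list
theorem pvSlice_eq_map (cs : List Int) {a b : Int} (h0 : 0 ≤ a) (hab : a ≤ b)
    (hb : b ≤ (cs.length : Int)) :
    PySem.List.slice cs (some a) (some b) = (PySem.List.pyRange a b 1).map (pvGv cs) := by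
  have h0b : (0:Int) ≤ b := le_trans h0 hab
  have key := PySem.List.map_pyGetD_pyRange' (xs := cs) (d := (0:Int)) (a := a) h0
  rw [PySem.List.pyRange_one_append a b (cs.length : Int) hab hb, List.map_append,
    PySem.List.map_pyGetD_pyRange' (xs := cs) (d := (0:Int)) (a := b) h0b] at key
  have hsl : PySem.List.slice cs (some a) (some b) = (cs.drop a.toNat).take (b.toNat - a.toNat) :=
    PySem.List.slice_toNat cs h0 h0b
  have hsplit : cs.drop a.toNat
      = (cs.drop a.toNat).take (b.toNat - a.toNat) ++ cs.drop b.toNat := by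
    conv_lhs => rw [← List.take_append_drop (b.toNat - a.toNat) (cs.drop a.toNat)]
    rw [List.drop_drop, show a.toNat + (b.toNat - a.toNat) = b.toNat by omega]
  rw [hsplit] at key
  rw [hsl, ← List.append_cancel_right key]
  rfl

theorem pvMax_window (cs : List Int) {a b hd : Int} (h0 : 0 ≤ a) (hab : a < b)
    (hb : b ≤ (cs.length : Int)) (hdl : a ≤ hd) (hdr : hd ≤ b - 1)
    (hmax : ∀ j, a ≤ j → j ≤ b - 1 → pvGv cs j ≤ pvGv cs hd) :
    PySem.List.max? (PySem.List.slice cs (some a) (some b)) (fun y => y) = some (pvGv cs hd) := by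
  rw [pvSlice_eq_map cs h0 (le_of_lt hab) hb, PySem.List.pyRange_one_cons hab, List.map_cons,
    PySem.List.max?_id_cons]
  congr 1
  set t := (PySem.List.pyRange (a + 1) b 1).map (pvGv cs) with ht
  have hub : ∀ y ∈ t, y ≤ pvGv cs hd := by
    intro y hy
    obtain ⟨j, hj, rfl⟩ := List.mem_map.mp hy
    rw [PySem.List.mem_pyRange_one] at hj
    exact hmax j (by omega) (by omega)
  have hle : t.foldl max (pvGv cs a) ≤ pvGv cs hd := by
    rcases PySem.List.foldl_max_mem t (pvGv cs a) with h1 | h1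
    · rw [h1]; exact hmax a (le_refl a) (by omega)
    · exact hub _ h1
  have hge : pvGv cs hd ≤ t.foldl max (pvGv cs a) := by
    rcases eq_or_lt_of_le hdl with h1 | h1
    · rw [← h1]; exact (PySem.List.le_foldl_max t (pvGv cs a)).1
    · refine (PySem.List.le_foldl_max t (pvGv cs a)).2 _ ?_
      exact List.mem_map.mpr ⟨hd, PySem.List.mem_pyRange_one.mpr ⟨by omega, by omega⟩, rfl⟩
  omega

theorem pvMin_window (cs : List Int) {a b hd : Int} (h0 : 0 ≤ a) (hab : a < b)
    (hb : b ≤ (cs.length : Int)) (hdl : a ≤ hd) (hdr : hd ≤ b - 1)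
    (hmin : ∀ j, a ≤ j → j ≤ b - 1 → pvGv cs hd ≤ pvGv cs j) :
    PySem.List.min? (PySem.List.slice cs (some a) (some b)) (fun y => y) = some (pvGv cs hd) := by
  rw [pvSlice_eq_map cs h0 (le_of_lt hab) hb, PySem.List.pyRange_one_cons hab, List.map_cons,
    PySem.List.min?_id_cons]
  congr 1
  set t := (PySem.List.pyRange (a + 1) b 1).map (pvGv cs) with ht
  have hub : ∀ y ∈ t, pvGv cs hd ≤ y := by
    intro y hy
    obtain ⟨j, hj, rfl⟩ := List.mem_map.mp hy
    rw [PySem.List.mem_pyRange_one] at hj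
    exact hmin j (by omega) (by omega)
  have hle : t.foldl min (pvGv cs a) ≤ pvGv cs hd := by
    rcases eq_or_lt_of_le hdl with h1 | h1
    · rw [← h1]; exact (PySem.List.foldl_min_le t (pvGv cs a)).1
    · refine (PySem.List.foldl_min_le t (pvGv cs a)).2 _ ?_
      exact List.mem_map.mpr ⟨hd, PySem.List.mem_pyRange_one.mpr ⟨by omega, by omega⟩, rfl⟩
  have hge : pvGv cs hd ≤ t.foldl min (pvGv cs a) := by
    rcases PySem.List.foldl_min_mem t (pvGv cs a) with h1 | h1
    · rw [h1]; exact hmin a (le_refl a) (by omega)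
    · exact hub _ h1
  omega

-- pushMax/pushMin realise the push step on deques in canonical form
theorem pvPushMax_cand (cs : List Int) {L r : Int} {D : List Int} (h : L ≤ r + 1)
    (hD : D = pvCand (pvGv cs) L r) :
    pvPushMax cs D (r + 1) = pvCand (pvGv cs) L (r + 1) := by
  subst hD
  rw [pvPushMax]
  exact pvCand_push (pvGv cs) h

theorem pvPushMin_cand (cs : List Int) {L r : Int} {D : List Int} (h : L ≤ r + 1)
    (hD : D = pvCand (fun x => -(pvGv cs x)) L r) :
    pvPushMin cs D (r + 1) = pvCand (fun x => -(pvGv cs x)) L (r + 1) := by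
  subst hD
  rw [pvPushMin]
  have hfun : (fun d => decide (pvGv cs d ≥ pvGv cs (r + 1)))
      = (fun d => decide ((fun x => -(pvGv cs x)) d ≤ (fun x => -(pvGv cs x)) (r + 1))) := by
    funext d
    exact decide_eq_decide.mpr ⟨fun h2 => by simpa using h2, fun h2 => by simpa using h2⟩
  rw [hfun]
  exact pvCand_push (fun x => -(pvGv cs x)) h

-- prefill loop: fold of pushes from the empty deques builds the canonical deques
theorem pvPrefill (cs : List Int) : ∀ (m : Nat) (L b : Int), L + (m : Int) = b →
    (PySem.List.pyRange L b 1).foldl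
        (fun (p : List Int × List Int) j => (pvPushMax cs p.1 j, pvPushMin cs p.2 j)) ([], [])
      = (pvCand (pvGv cs) L (b - 1), pvCand (fun x => -(pvGv cs x)) L (b - 1)) := by
  intro m
  induction m with
  | zero =>
    intro L b hLb
    have hbL : b = L := by omega
    subst hbL
    rw [PySem.List.pyRange_one_eq_nil (le_refl b)]
    simp [pvCand]
  | succ m ih =>
    intro L b hLb
    have h1 : L ≤ b - 1 := by omega
    conv_lhs => rw [show b = (b - 1) + 1 by omega, PySem.List.pyRange_one_succ_right h1]
    rw [List.foldl_append, ih L (b - 1) (by omega)]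
    simp only [List.foldl_cons, List.foldl_nil]
    rw [show b - 1 - 1 = b - 2 by omega, show b - 1 = (b - 2) + 1 by omega]
    exact Prod.ext (pvPushMax_cand cs (by omega) rfl) (pvPushMin_cand cs (by omega) rfl)

-- main loop: with canonical deques, B's fold carries the same highs/lows as A's fold
theorem pvLoop (cs : List Int) : ∀ (m : Nat) (i L1 L2 : Int) (D1 D2 : List Int)
    (hs ls : List (Int × Int)),
    5 ≤ i → i + (m : Int) = (cs.length : Int) - 5 →
    i - 6 ≤ L1 → L1 ≤ i - 5 → D1 = pvCand (pvGv cs) L1 (i + 4) →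
    i - 6 ≤ L2 → L2 ≤ i - 5 → D2 = pvCand (fun x => -(pvGv cs x)) L2 (i + 4) →
    (PySem.List.pyRange i ((cs.length : Int) - 5) 1).foldl
        (fun st j =>
          let window := PySem.List.slice cs (some (j - 5)) (some (j + 5 + 1))
          let mid := pvGv cs j
          let st1 := if PySem.List.max? window (fun y => y) = some mid then (st.1 ++ [(j, mid)], st.2) else st
          if PySem.List.min? window (fun y => y) = some mid then (st1.1, st1.2 ++ [(j, mid)]) else st1)
        (hs, ls)
      = ((PySem.List.pyRange i ((cs.length : Int) - 5) 1).foldl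
          (fun (st : (List Int × List Int) × (List (Int × Int) × List (Int × Int))) j =>
            let maxd := pvTrim (pvPushMax cs st.1.1 (j + 5)) (j - 5)
            let mind := pvTrim (pvPushMin cs st.1.2 (j + 5)) (j - 5)
            let c := pvGv cs j
            let hs' := if c = pvGv cs (maxd.headD 0) then st.2.1 ++ [(j, c)] else st.2.1
            let ls' := if c = pvGv cs (mind.headD 0) then st.2.2 ++ [(j, c)] else st.2.2
            ((maxd, mind), (hs', ls')))
          ((D1, D2), (hs, ls))).2 := by
  intro m
  induction m with
  | zero =>
    intro i L1 L2 D1 D2 hs ls h5 hm hL1a hL1b hD1 hL2a hL2b hD2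
    rw [PySem.List.pyRange_one_eq_nil (by omega)]
    simp
  | succ m ih =>
    intro i L1 L2 D1 D2 hs ls h5 hm hL1a hL1b hD1 hL2a hL2b hD2
    have hin : i < (cs.length : Int) - 5 := by omega
    rw [PySem.List.pyRange_one_cons hin]
    simp only [List.foldl_cons]
    have hpush1 : pvPushMax cs D1 (i + 5) = pvCand (pvGv cs) L1 (i + 5) := by
      have h := pvPushMax_cand cs (L := L1) (r := i + 4) (by omega) hD1
      rwa [show (i + 4) + 1 = i + 5 by omega] at h
    have hpush2 : pvPushMin cs D2 (i + 5) = pvCand (fun x => -(pvGv cs x)) L2 (i + 5) := by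
      have h := pvPushMin_cand cs (L := L2) (r := i + 4) (by omega) hD2
      rwa [show (i + 4) + 1 = i + 5 by omega] at h
    have htrim1 : pvTrim (pvCand (pvGv cs) L1 (i + 5)) (i - 5)
        = pvCand (pvGv cs) (i - 5) (i + 5) := by
      rcases eq_or_lt_of_le hL1b with hE | hlt
      · rw [← hE]
        exact pvTrim_noop (fun d hd => (mem_pvCand.mp hd).1)
      · have hE : L1 = i - 6 := by omega
        rw [hE, show i - 5 = (i - 6) + 1 by omega]
        exact pvTrim_cand _ (by omega)
    have htrim2 : pvTrim (pvCand (fun x => -(pvGv cs x)) L2 (i + 5)) (i - 5)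
        = pvCand (fun x => -(pvGv cs x)) (i - 5) (i + 5) := by
      rcases eq_or_lt_of_le hL2b with hE | hlt
      · rw [← hE]
        exact pvTrim_noop (fun d hd => (mem_pvCand.mp hd).1)
      · have hE : L2 = i - 6 := by omega
        rw [hE, show i - 5 = (i - 6) + 1 by omega]
        exact pvTrim_cand _ (by omega)
    obtain ⟨hd1, hh1, hd1l, hd1r, hmax1⟩ := pvCand_head (pvGv cs) (show i - 5 ≤ i + 5 by omega)
    obtain ⟨hd2, hh2, hd2l, hd2r, hmax2⟩ :=
      pvCand_head (fun x => -(pvGv cs x)) (show i - 5 ≤ i + 5 by omega)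
    have hmaxw : PySem.List.max? (PySem.List.slice cs (some (i - 5)) (some (i + 5 + 1)))
        (fun y => y) = some (pvGv cs hd1) :=
      pvMax_window cs (by omega) (by omega) (by omega) (by omega) (by omega)
        (fun j hj1 hj2 => hmax1 j hj1 (by omega))
    have hminw : PySem.List.min? (PySem.List.slice cs (some (i - 5)) (some (i + 5 + 1)))
        (fun y => y) = some (pvGv cs hd2) :=
      pvMin_window cs (by omega) (by omega) (by omega) (by omega) (by omega)
        (fun j hj1 hj2 => by have h' := hmax2 j hj1 (by omega); simp only at h'; omega)
    have hhd1 : (pvCand (pvGv cs) (i - 5) (i + 5)).headD 0 = hd1 := by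
      rw [List.headD_eq_head?_getD, hh1]; rfl
    have hhd2 : (pvCand (fun x => -(pvGv cs x)) (i - 5) (i + 5)).headD 0 = hd2 := by
      rw [List.headD_eq_head?_getD, hh2]; rfl
    simp only [hpush1, hpush2, htrim1, htrim2, hmaxw, hminw, hhd1, hhd2, Option.some.injEq]
    have hD1x : pvCand (pvGv cs) (i - 5) (i + 5)
        = pvCand (pvGv cs) (i - 5) ((i + 1) + 4) := by rw [show (i + 1) + 4 = i + 5 by omega]
    have hD2x : pvCand (fun x => -(pvGv cs x)) (i - 5) (i + 5)
        = pvCand (fun x => -(pvGv cs x)) (i - 5) ((i + 1) + 4) := by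
      rw [show (i + 1) + 4 = i + 5 by omega]
    by_cases hc1 : pvGv cs i = pvGv cs hd1 <;> by_cases hc2 : pvGv cs i = pvGv cs hd2
    · simp only [if_pos hc1.symm, if_pos hc2.symm, if_pos hc1, if_pos hc2]
      exact ih (i + 1) (i - 5) (i - 5) _ _ _ _ (by omega) (by omega) (by omega) (by omega)
        hD1x (by omega) (by omega) hD2x
    · have hA2 : ¬ pvGv cs hd2 = pvGv cs i := fun h => hc2 h.symm
      simp only [if_pos hc1.symm, if_neg hA2, if_pos hc1, if_neg hc2]
      exact ih (i + 1) (i - 5) (i - 5) _ _ _ _ (by omega) (by omega) (by omega) (by omega)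
        hD1x (by omega) (by omega) hD2x
    · have hA1 : ¬ pvGv cs hd1 = pvGv cs i := fun h => hc1 h.symm
      simp only [if_neg hA1, if_pos hc2.symm, if_neg hc1, if_pos hc2]
      exact ih (i + 1) (i - 5) (i - 5) _ _ _ _ (by omega) (by omega) (by omega) (by omega)
        hD1x (by omega) (by omega) hD2x
    · have hA1 : ¬ pvGv cs hd1 = pvGv cs i := fun h => hc1 h.symm
      have hA2 : ¬ pvGv cs hd2 = pvGv cs i := fun h => hc2 h.symm
      simp only [if_neg hA1, if_neg hA2, if_neg hc1, if_neg hc2]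
      exact ih (i + 1) (i - 5) (i - 5) _ _ _ _ (by omega) (by omega) (by omega) (by omega)
        hD1x (by omega) (by omega) hD2x

-- ===== VERDICT (by name: the statement is the Claim_ definition above) =====
theorem find_structural_swings_py_spec : Claim_equal_find_structural_swings_py := by
  unfold Claim_equal_find_structural_swings_py
  intro closes bs _
  unfold Spec_find_structural_swings_py
  by_cases hcase : (closes.length : Int) - 5 - 1 < max 5 bs
  · simp [find_structural_swings_py, find_structural_swings_py_alt, hcase,
      PySem.List.pyRange_one_eq_nil (show (closes.length : Int) - 5 ≤ max 5 bs by omega)]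
  · simp only [find_structural_swings_py, find_structural_swings_py_alt, if_neg hcase]
    have hpre := pvPrefill closes 10 (max 5 bs - 5) (max 5 bs + 5) (by push_cast; omega)
    rw [hpre]
    have hloop := pvLoop closes ((closes.length : Int) - 5 - max 5 bs).toNat (max 5 bs)
      (max 5 bs - 5) (max 5 bs - 5)
      (pvCand (pvGv closes) (max 5 bs - 5) (max 5 bs + 5 - 1))
      (pvCand (fun x => -(pvGv closes x)) (max 5 bs - 5) (max 5 bs + 5 - 1))
      [] [] (le_max_left 5 bs)
      (by rw [Int.toNat_of_nonneg (by omega)]; omega)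
      (by omega) (by omega) (by rw [show max 5 bs + 5 - 1 = max 5 bs + 4 by omega])
      (by omega) (by omega) (by rw [show max 5 bs + 5 - 1 = max 5 bs + 4 by omega])
    exact hloop
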